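-- pv_equiv track=rewrite | github.com/aodoan/The-Great-Dalmuti-DGRAM | src/message.py | return_carta
-- ===== SOURCE A (Python) =====
-- def return_carta(num):
--     contador = 0
--     if(num == 79 or num == 80):
--         return 13
--     for i in range(1, 13):
--         for j in range(0, i):
--             contador += 1
--             if(contador == num):
--                 return i
-- ===== SOURCE B (Python) =====
-- import math
--
-- def return_carta(num):
--     if num == 79 or num == 80:
--         return 13
--     return (math.isqrt(8 * num - 7) + 1) // 2
-- ===== Notes on version B (the rewrite author's own statement) =====
-- stated objective: simpler
-- what changed: Replaces the nested counting loops by a closed-form inverse triangular-number formula using math.isqrt.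
-- outside the precondition, e.g. on return_carta(0): A returns None, B raises ValueError; on return_carta(81): A returns None, B returns 13
import Mathlib
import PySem

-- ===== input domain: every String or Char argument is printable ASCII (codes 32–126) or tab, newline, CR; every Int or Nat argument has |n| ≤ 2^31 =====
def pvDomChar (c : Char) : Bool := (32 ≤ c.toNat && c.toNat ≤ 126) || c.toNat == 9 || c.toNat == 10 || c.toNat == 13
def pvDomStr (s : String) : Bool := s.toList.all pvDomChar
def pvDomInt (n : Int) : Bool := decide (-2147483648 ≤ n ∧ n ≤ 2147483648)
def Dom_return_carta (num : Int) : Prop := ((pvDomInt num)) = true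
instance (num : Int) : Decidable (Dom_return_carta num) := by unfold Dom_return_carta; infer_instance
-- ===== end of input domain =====

-- B replaces A's nested counting loops by the closed-form inverse triangular-number formula (objective: simpler).

-- ===== PORT A =====
-- the nested for-loops with early return, carried as (contador, found) state
def return_carta (num : Int) : Int :=
  if num == 79 || num == 80 then 13
  else
    let r := (PySem.List.pyRange 1 13 1).foldl
      (fun (st : Int × Option Int) i =>
        (PySem.List.pyRange 0 i 1).foldl
          (fun st _j =>
            match st with
            | (c, some v) => (c, some v)
            | (c, none) =>
              let c := c + 1
              if c == num then (c, some i) else (c, none))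
          st)
      ((0 : Int), (none : Option Int))
    -- Python returns None when the loops exhaust; those inputs are outside Pre_
    r.2.getD 0

-- ===== PORT B =====
-- math.isqrt, ported as Newton's integer-sqrt iteration (fuel n is ample: x strictly decreases each step)
def isqrtGo (n : Nat) : Nat → Nat → Nat
  | 0, x => x
  | fuel + 1, x =>
    let y := (x + n / x) / 2
    if y < x then isqrtGo n fuel y else x

def isqrt (n : Nat) : Nat := if n = 0 then 0 else isqrtGo n n n

def return_carta_alt (num : Int) : Int :=
  if num == 79 || num == 80 then 13
  else ((isqrt (8 * num - 7).toNat : Int) + 1) / 2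

-- ===== PRECONDITION & SPEC =====
-- Pre_ excludes nonpositive and too-large card numbers, on which A falls through its loops and returns None (no int value).
def Pre_return_carta (num : Int) : Prop := 1 ≤ num ∧ num ≤ 80
instance (num : Int) : Decidable (Pre_return_carta num) := by unfold Pre_return_carta; infer_instance
def pvWitness_return_carta : Int := 5

def Spec_return_carta (num : Int) (out : Int) : Prop := out = return_carta_alt num
instance (num : Int) (out : Int) : Decidable (Spec_return_carta num out) := by unfold Spec_return_carta; infer_instance

-- ===== CLAIM (what is proved, stated in full; the proofs are below) =====
def Claim_equal_return_carta : Prop := ∀ (num : Int), Dom_return_carta num → Pre_return_carta num → Spec_return_carta num (return_carta num)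

-- ===== LEMMAS AND PROOFS =====

-- ===== VERDICT (by name: the statement is the Claim_ definition above) =====
theorem return_carta_spec : Claim_equal_return_carta := by
  unfold Claim_equal_return_carta
  intro num _ hpre
  obtain ⟨h1, h2⟩ := hpre
  unfold Spec_return_carta
  interval_cases num <;> decide
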